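-- pv_equiv track=rewrite | github.com/cabeatty/python-rsa | block.py | st2bv
-- ===== SOURCE A (Python) =====
-- ind =  ["00","01","02","03","04","05","06","07","08","09","10","11","12","13","14","15","16","17","18","19","20","21","22","23","24","25"]
--
-- alph = [ "A", "B", "C", "D", "E", "F", "G", "H", "I", "J", "K", "L", "M", "N", "O", "P", "Q", "R", "S", "T", "U", "V", "W", "X", "Y", "Z"]
--
-- def st2bv(input):
--     input, inter, output = list(''.join(e for e in input.upper() if e.isalnum())), [], []
--     for i in range(len(input)):
--         for j in range(len(alph)):
--             if (input[i] == alph[j]):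
--                 inter.append(ind[j])
--     for i in range(0, len(inter)-1, 2):
--         output.append(inter[i] + inter[i+1])
--     if ( len(inter)%2 == 1 ):
--         output.append( "00" + inter[len(inter)-1] )
--     for i in range( len(output) ):
--         output[i] = int(output[i])
--     return output
-- ===== SOURCE B (Python) =====
-- def st2bv(input):
--     out = []
--     pending = None
--     for c in input.upper():
--         if 'A' <= c <= 'Z':
--             v = ord(c) - 65
--             if pending is None:
--                 pending = v
--             else:
--                 out.append(pending * 100 + v)
--                 pending = None
--     if pending is not None:
--         out.append(pending)
--     return out
-- ===== Notes on version B (the rewrite author's own statement) =====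
-- stated objective: faster
-- what changed: A's three staged passes over intermediate lists (a 26-way per-character alphabet-table scan building two-digit strings, an index-driven string-concatenation pairing loop, and an int() re-parsing pass) are replaced by a single streaming pass: a state machine over the uppercased characters that carries one optional pending letter code, emitting pending*100+code when a pair completes and flushing the pending code at the end, with no intermediate lists or strings at all.
import Mathlib
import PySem

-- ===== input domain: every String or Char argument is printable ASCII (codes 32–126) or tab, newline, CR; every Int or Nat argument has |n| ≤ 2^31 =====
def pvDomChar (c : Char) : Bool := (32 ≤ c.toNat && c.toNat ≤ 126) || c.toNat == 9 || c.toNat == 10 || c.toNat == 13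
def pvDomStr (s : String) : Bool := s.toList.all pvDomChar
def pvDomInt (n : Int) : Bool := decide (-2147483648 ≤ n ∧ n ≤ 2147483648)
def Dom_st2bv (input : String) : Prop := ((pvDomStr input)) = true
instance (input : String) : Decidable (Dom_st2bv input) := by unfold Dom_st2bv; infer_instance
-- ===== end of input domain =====

-- B replaces A's three staged passes over intermediate lists (26-way alphabet-table scan building
-- two-digit strings, index-driven string-concatenation pairing, int() re-parsing) by ONE streaming
-- pass: a state machine carrying an optional pending letter code, emitting pending*100+code when a
-- pair completes and flushing the pending code at the end — objective: faster (single pass, no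
-- intermediate lists or strings).

-- ===== PORT A =====
-- Python strings are ported as List Char (PySem.Chars level) so the kernel can evaluate them;
-- alph holds one-char strings, compared as chars (exact for 1-char strings).
def indA : List (List Char) :=
  [['0','0'],['0','1'],['0','2'],['0','3'],['0','4'],['0','5'],['0','6'],['0','7'],['0','8'],['0','9'],
   ['1','0'],['1','1'],['1','2'],['1','3'],['1','4'],['1','5'],['1','6'],['1','7'],['1','8'],['1','9'],
   ['2','0'],['2','1'],['2','2'],['2','3'],['2','4'],['2','5']]

def alphA : List Char :=
  ['A','B','C','D','E','F','G','H','I','J','K','L','M','N','O','P','Q','R','S','T','U','V','W','X','Y','Z']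

def st2bv (input : String) : List Int :=
  -- input = list(''.join(e for e in input.upper() if e.isalnum()))
  let inp : List Char := (PySem.Chars.upper input.toList).filter PySem.Chars.isalnum
  -- for i in range(len(input)): for j in range(len(alph)): if input[i] == alph[j]: inter.append(ind[j])
  -- (indices i, j are always in range, so pyGetD's default is never used)
  let inter : List (List Char) := inp.foldl (fun inter c =>
      (PySem.List.pyRange 0 (alphA.length : Int) 1).foldl (fun inter j =>
        if c = PySem.List.pyGetD alphA j ' ' then inter ++ [PySem.List.pyGetD indA j []] else inter)
        inter) []
  -- for i in range(0, len(inter)-1, 2): output.append(inter[i] + inter[i+1])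
  let output : List (List Char) := (PySem.List.pyRange 0 ((inter.length : Int) - 1) 2).foldl
      (fun out i => out ++ [PySem.List.pyGetD inter i [] ++ PySem.List.pyGetD inter (i + 1) []]) []
  -- if len(inter)%2 == 1: output.append("00" + inter[len(inter)-1])
  let output := if inter.length % 2 == 1 then
      output ++ [['0','0'] ++ PySem.List.pyGetD inter ((inter.length : Int) - 1) []] else output
  -- output[i] = int(output[i])  — every element is a non-empty digit string, so int() never raises
  output.map (fun s => (PySem.Int.ofChars? s).getD 0)

-- ===== PORT B =====
-- loop body: on a letter, either stash its code as pending or complete a block pending*100+v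
def st2bvStep (st : List Int × Option Int) (c : Char) : List Int × Option Int :=
  if 'A' ≤ c ∧ c ≤ 'Z' then
    match st.2 with
    | none => (st.1, some ((c.toNat : Int) - 65))
    | some p => (st.1 ++ [p * 100 + ((c.toNat : Int) - 65)], none)
  else st

-- after the loop: if pending is not None: out.append(pending)
def st2bvFinish (st : List Int × Option Int) : List Int :=
  match st.2 with
  | none => st.1
  | some p => st.1 ++ [p]

def st2bv_alt (input : String) : List Int :=
  st2bvFinish ((PySem.Chars.upper input.toList).foldl st2bvStep ([], none))

-- ===== PRECONDITION & SPEC =====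
def Spec_st2bv (input : String) (out : List Int) : Prop := out = st2bv_alt input
instance (input : String) (out : List Int) : Decidable (Spec_st2bv input out) := by
  unfold Spec_st2bv; infer_instance

-- ===== CLAIM (what is proved, stated in full; the proofs are below) =====
def Claim_equal_st2bv : Prop := ∀ (input : String), Dom_st2bv input → Spec_st2bv input (st2bv input)

-- ===== LEMMAS AND PROOFS =====

-- proof-side abbreviations
def azB (c : Char) : Bool := decide ('A' ≤ c ∧ c ≤ 'Z')
def twoDigitN (n : Nat) : List Char := [Char.ofNat (48 + n / 10), Char.ofNat (48 + n % 10)]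
def twoDig (c : Char) : List Char := twoDigitN (c.toNat - 65)
def codeI (c : Char) : Int := (c.toNat : Int) - 65
def toIntD (s : List Char) : Int := (PySem.Int.ofChars? s).getD 0
-- common value both programs are proved equal to: the letter codes paired two at a time
def pack : List Int → List Int
  | [] => []
  | [a] => [a]
  | a :: b :: rest => (a * 100 + b) :: pack rest
-- result of A's inner j-loop for one character
def sel (c : Char) : List (List Char) :=
  ((PySem.List.pyRange 0 26 1).filter (fun j => decide (c = PySem.List.pyGetD alphA j ' '))).map
    (fun j => PySem.List.pyGetD indA j [])
-- closed form of A's pairing loop and of the odd-tail append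
def aBlocks (xs : List (List Char)) : List (List Char) :=
  (List.range (xs.length / 2)).map
    (fun (k : Nat) => PySem.List.pyGetD xs (2 * (k : Int)) [] ++ PySem.List.pyGetD xs (2 * (k : Int) + 1) [])
def oddTail (xs : List (List Char)) : List (List Char) :=
  if xs.length % 2 == 1 then [['0','0'] ++ PySem.List.pyGetD xs ((xs.length : Int) - 1) []] else []

-- character-table facts, decided over the ASCII range
lemma az_toNat (c : Char) : azB c = true ↔ (65 ≤ c.toNat ∧ c.toNat ≤ 90) := by
  unfold azB
  rw [decide_eq_true_iff, Char.le_def, Char.le_def, UInt32.le_iff_toNat_le, UInt32.le_iff_toNat_le]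
  exact Iff.rfl

set_option maxRecDepth 10000 in
lemma sel_table : ∀ n : Fin 128,
    sel (Char.ofNat n.val) =
      if azB (Char.ofNat n.val) then [twoDigitN (n.val - 65)] else [] := by decide

lemma sel_char {c : Char} (h : c.toNat < 128) :
    sel c = if azB c then [twoDig c] else [] := by
  have := sel_table ⟨c.toNat, h⟩
  simpa [Char.ofNat_toNat, twoDig] using this

lemma upperChar_lt : ∀ n : Fin 128, (PySem.Chars.upperChar (Char.ofNat n.val)).toNat < 128 := by
  decide

lemma upperChar_lt' {c : Char} (h : c.toNat < 128) : (PySem.Chars.upperChar c).toNat < 128 := by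
  have := upperChar_lt ⟨c.toNat, h⟩
  simpa [Char.ofNat_toNat] using this

lemma alnum_absorb : ∀ n : Fin 128,
    (azB (Char.ofNat n.val) && PySem.Chars.isalnum (Char.ofNat n.val)) = azB (Char.ofNat n.val) := by
  decide

lemma alnum_absorb' {c : Char} (h : c.toNat < 128) :
    (azB c && PySem.Chars.isalnum c) = azB c := by
  have := alnum_absorb ⟨c.toNat, h⟩
  simpa [Char.ofNat_toNat] using this

lemma parse_pair : ∀ i j : Fin 26,
    PySem.Int.ofChars? (twoDigitN i.val ++ twoDigitN j.val) = some ((i.val : Int) * 100 + (j.val : Int)) := by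
  decide

lemma parse_single : ∀ i : Fin 26,
    PySem.Int.ofChars? (['0','0'] ++ twoDigitN i.val) = some (i.val : Int) := by decide

-- stage 1: the double loop builds inter = flatMap sel, which is filter-then-map
lemma inner_loop (c : Char) (inter : List (List Char)) :
    (PySem.List.pyRange 0 (alphA.length : Int) 1).foldl (fun inter j =>
        if c = PySem.List.pyGetD alphA j ' ' then inter ++ [PySem.List.pyGetD indA j []] else inter)
        inter = inter ++ sel c := by
  have hl : (alphA.length : Int) = 26 := by decide
  rw [hl, sel, PySem.List.foldl_append_ite]

lemma flatMap_sel (cs : List Char) (h : ∀ c ∈ cs, c.toNat < 128) :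
    cs.flatMap sel = (cs.filter azB).map twoDig := by
  induction cs with
  | nil => rfl
  | cons a t ih =>
    have ha := sel_char (h a (List.mem_cons_self))
    have ht := ih (fun c hc => h c (List.mem_cons_of_mem _ hc))
    by_cases haz : azB a
    · simp [List.flatMap_cons, ha, haz, ht]
    · simp [List.flatMap_cons, ha, haz, ht]

-- stage 2: closed form of the pairing loop
lemma pairfold_eq (xs : List (List Char)) :
    (PySem.List.pyRange 0 ((xs.length : Int) - 1) 2).foldl
      (fun out i => out ++ [PySem.List.pyGetD xs i [] ++ PySem.List.pyGetD xs (i + 1) []]) []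
      = aBlocks xs := by
  rw [PySem.List.pyRange_of_pos _ _ (by norm_num)]
  have hcnt : (if (0:Int) < (xs.length : Int) - 1 then
      (((xs.length : Int) - 1 - 0 + 2 - 1) / 2).toNat else 0) = xs.length / 2 := by
    split <;> omega
  rw [hcnt, List.foldl_map, PySem.List.foldl_append_singleton_eq_map, aBlocks]
  simp

lemma aBlocks_cons_cons (u v : List Char) (t : List (List Char)) :
    aBlocks (u :: v :: t) = (u ++ v) :: aBlocks t := by
  unfold aBlocks
  have hlen : (u :: v :: t).length / 2 = t.length / 2 + 1 := by simp; omega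
  rw [hlen, List.range_succ_eq_map, List.map_cons, List.map_map]
  congr 1
  · norm_num
    rw [show ((1:Int)) = ((1:Nat) : Int) by rfl, PySem.List.pyGetD_natCast]
    rfl
  · apply List.map_congr_left
    intro k _
    simp only [Function.comp]
    have h1 : 2 * ((k + 1 : Nat) : Int) = ((2 * k + 2 : Nat) : Int) := by push_cast; ring
    have h2 : 2 * ((k + 1 : Nat) : Int) + 1 = ((2 * k + 3 : Nat) : Int) := by push_cast; ring
    have h3 : 2 * ((k : Nat) : Int) = ((2 * k : Nat) : Int) := by push_cast; ring
    have h4 : 2 * ((k : Nat) : Int) + 1 = ((2 * k + 1 : Nat) : Int) := by push_cast; ring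
    rw [h2, h1, h4, h3, PySem.List.pyGetD_natCast, PySem.List.pyGetD_natCast,
      PySem.List.pyGetD_natCast, PySem.List.pyGetD_natCast]
    rw [show 2 * k + 2 = (2 * k) + 1 + 1 from rfl, show 2 * k + 3 = (2 * k + 1) + 1 + 1 from rfl]
    simp only [List.getD_cons_succ]

lemma oddTail_cons_cons (u v : List Char) (t : List (List Char)) :
    oddTail (u :: v :: t) = oddTail t := by
  unfold oddTail
  have hlen : (u :: v :: t).length = t.length + 2 := by simp
  rw [hlen]
  by_cases h : t.length % 2 = 1
  · have h2 : (t.length + 2) % 2 = 1 := by omega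
    have hge : 1 ≤ t.length := by omega
    simp only [h, h2, beq_iff_eq, if_true]
    have e1 : ((t.length + 2 : Nat) : Int) - 1 = ((t.length + 1 : Nat) : Int) := by push_cast; ring
    have e2 : ((t.length : Nat) : Int) - 1 = ((t.length - 1 : Nat) : Int) := by
      push_cast [hge]; omega
    rw [e1, e2, PySem.List.pyGetD_natCast, PySem.List.pyGetD_natCast]
    have : t.length + 1 = (t.length - 1) + 2 := by omega
    rw [this]
    rfl
  · have h2 : ¬ ((t.length + 2) % 2 = 1) := by omega
    simp [h]

-- stage 3 (A side): the string pairing + int() round-trip equals pack of the codes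
theorem main_pack (cs : List Char) (h : ∀ c ∈ cs, azB c = true) :
    ((aBlocks (cs.map twoDig) ++ oddTail (cs.map twoDig)).map toIntD) = pack (cs.map codeI) := by
  match cs with
  | [] => rfl
  | [a] =>
    have ha := (az_toNat a).mp (h a (List.mem_cons_self))
    have := parse_single ⟨a.toNat - 65, by omega⟩
    simp only [List.map_cons, List.map_nil]
    show ((aBlocks [twoDig a] ++ oddTail [twoDig a]).map toIntD) = pack [codeI a]
    have hB : aBlocks [twoDig a] = [] := by simp [aBlocks]
    have hO : oddTail [twoDig a] = [['0','0'] ++ twoDig a] := by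
      unfold oddTail
      simp only [List.length_cons, List.length_nil]
      rw [show ((1:Nat) : Int) - 1 = ((0:Nat) : Int) by rfl, PySem.List.pyGetD_natCast]
      rfl
    rw [hB, hO]
    show [toIntD (['0','0'] ++ twoDig a)] = pack [codeI a]
    have hpk : pack [codeI a] = [codeI a] := rfl
    rw [hpk]
    unfold toIntD twoDig
    rw [this]
    unfold codeI
    simp
    omega
  | a :: b :: t =>
    have ha := (az_toNat a).mp (h a (List.mem_cons_self))
    have hb := (az_toNat b).mp (h b (List.mem_cons_of_mem _ (List.mem_cons_self)))
    have ht : ∀ c ∈ t, azB c = true := fun c hc =>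
      h c (List.mem_cons_of_mem _ (List.mem_cons_of_mem _ hc))
    have ih := main_pack t ht
    simp only [List.map_cons]
    rw [aBlocks_cons_cons, oddTail_cons_cons]
    rw [List.cons_append]
    rw [List.map_cons, ih]
    have hpk : pack (codeI a :: codeI b :: t.map codeI) =
        (codeI a * 100 + codeI b) :: pack (t.map codeI) := rfl
    rw [hpk]
    congr 1
    have hpp := parse_pair ⟨a.toNat - 65, by omega⟩ ⟨b.toNat - 65, by omega⟩
    unfold toIntD twoDig
    rw [hpp]
    unfold codeI
    simp only [Option.getD_some]
    push_cast [ha.1, hb.1]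
    ring
termination_by cs.length

-- the port's conditional append is append of oddTail
lemma if_oddTail (output inter : List (List Char)) :
    (if inter.length % 2 == 1 then
      output ++ [['0','0'] ++ PySem.List.pyGetD inter ((inter.length : Int) - 1) []] else output)
      = output ++ oddTail inter := by
  unfold oddTail
  by_cases h : inter.length % 2 == 1 <;> simp [h]

-- B side, stage 1: the step function ignores non-letters, so the fold factors through the filter
lemma step_skip {c : Char} (h : azB c = false) (st : List Int × Option Int) :
    st2bvStep st c = st := by
  unfold st2bvStep
  rw [if_neg]
  intro hc
  rw [show azB c = true from by unfold azB; exact decide_eq_true hc] at h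
  exact absurd h (by simp)

lemma foldl_step_filter (cs : List Char) (st : List Int × Option Int) :
    cs.foldl st2bvStep st = (cs.filter azB).foldl st2bvStep st := by
  induction cs generalizing st with
  | nil => rfl
  | cons a t ih =>
    by_cases ha : azB a
    · simp [ha, ih]
    · have := step_skip (Bool.eq_false_iff.mpr ha) st
      simp [Bool.eq_false_iff.mpr ha, this, ih]

-- B side, stage 2: on an all-letters list the state machine computes pack of the codes
theorem alt_pack (cs : List Char) (out : List Int) (h : ∀ c ∈ cs, azB c = true) :
    st2bvFinish (cs.foldl st2bvStep (out, none)) = out ++ pack (cs.map codeI) := by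
  match cs with
  | [] => simp [st2bvFinish, pack]
  | [a] =>
    have ha : 'A' ≤ a ∧ a ≤ 'Z' := by
      have := h a (List.mem_cons_self); unfold azB at this; exact of_decide_eq_true this
    simp [st2bvStep, ha, st2bvFinish, pack, codeI]
  | a :: b :: t =>
    have ha : 'A' ≤ a ∧ a ≤ 'Z' := by
      have := h a (List.mem_cons_self); unfold azB at this; exact of_decide_eq_true this
    have hb : 'A' ≤ b ∧ b ≤ 'Z' := by
      have := h b (List.mem_cons_of_mem _ (List.mem_cons_self)); unfold azB at this
      exact of_decide_eq_true this
    have ht : ∀ c ∈ t, azB c = true := fun c hc =>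
      h c (List.mem_cons_of_mem _ (List.mem_cons_of_mem _ hc))
    have ih := alt_pack t (out ++ [codeI a * 100 + codeI b]) ht
    have hstep2 : ((a :: b :: t).foldl st2bvStep (out, none))
        = t.foldl st2bvStep (out ++ [codeI a * 100 + codeI b], none) := by
      simp [List.foldl_cons, st2bvStep, ha, hb, codeI]
    rw [hstep2, ih]
    have hpk : pack (codeI a :: codeI b :: t.map codeI) =
        (codeI a * 100 + codeI b) :: pack (t.map codeI) := rfl
    simp [hpk]
termination_by cs.length

-- ===== VERDICT (by name: the statement is the Claim_ definition above) =====
theorem st2bv_spec : Claim_equal_st2bv := by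
  unfold Claim_equal_st2bv
  intro input hdom
  unfold Spec_st2bv st2bv st2bv_alt
  simp only []
  -- all characters of the uppercased input are ASCII
  have hU : ∀ c ∈ PySem.Chars.upper input.toList, c.toNat < 128 := by
    intro c hc
    unfold PySem.Chars.upper at hc
    rcases List.mem_map.mp hc with ⟨c', hc', rfl⟩
    have hd : pvDomChar c' = true := by
      have := (List.all_eq_true.mp hdom) c' hc'
      exact this
    have hlt : c'.toNat < 128 := by
      unfold pvDomChar at hd
      simp at hd
      omega
    exact upperChar_lt' hlt
  set U := PySem.Chars.upper input.toList with hUdef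
  -- A, stage 1: inter = (U.filter azB).map twoDig
  have h1 : (U.filter PySem.Chars.isalnum).foldl (fun inter c =>
      (PySem.List.pyRange 0 (alphA.length : Int) 1).foldl (fun inter j =>
        if c = PySem.List.pyGetD alphA j ' ' then inter ++ [PySem.List.pyGetD indA j []] else inter)
        inter) [] = (U.filter azB).map twoDig := by
    have hfun2 : (fun (inter : List (List Char)) (c : Char) =>
        (PySem.List.pyRange 0 (alphA.length : Int) 1).foldl (fun inter j =>
          if c = PySem.List.pyGetD alphA j ' ' then inter ++ [PySem.List.pyGetD indA j []]
          else inter) inter)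
        = (fun (inter : List (List Char)) (c : Char) => inter ++ sel c) := by
      funext inter c; exact inner_loop c inter
    rw [hfun2, PySem.List.foldl_append_eq_flatMap]
    rw [flatMap_sel _ (fun c hc => hU c (List.mem_of_mem_filter hc))]
    rw [List.filter_filter]
    rw [List.nil_append]
    congr 1
    apply List.filter_congr
    intro c hc
    exact alnum_absorb' (hU c hc)
  rw [h1, pairfold_eq, if_oddTail]
  have hletters : ∀ c ∈ U.filter azB, azB c = true := fun c hc => List.of_mem_filter hc
  have hmain := main_pack (U.filter azB) hletters
  have hfun : (fun s => (PySem.Int.ofChars? s).getD 0) = toIntD := rfl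
  rw [hfun, hmain]
  -- B: the fold filters to letters and computes pack of the codes
  rw [foldl_step_filter, alt_pack (U.filter azB) [] hletters]
  rfl
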